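-- pv_equiv track=rewrite | github.com/shrivathsap/advent_of_code | 2024/day16/day16.py | is_corner
-- ===== SOURCE A (Python) =====
-- def is_corner(maze, pos):
--     x, y = pos[0], pos[1]
--     if maze[x][y] == "#":
--         return False
--     else:
--         #two roads diverged in a yellow wood
--         roads = [n for n in [(x-1, y), (x, y+1), (x+1, y), (x, y-1)] if maze[n[0]][n[1]] == "."]
--         if len(roads) >2:
--             return True
--         elif len(roads) == 2 and (roads[0][0]!=roads[1][0]) and (roads[0][1]!=roads[1][1]):
--             return True
--         else:
--             return False
-- ===== SOURCE B (Python) =====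
-- def is_corner(maze, pos):
--     x, y = pos[0], pos[1]
--     if maze[x][y] == "#":
--         return False
--     up = maze[x-1][y] == "."
--     right = maze[x][y+1] == "."
--     down = maze[x+1][y] == "."
--     left = maze[x][y-1] == "."
--     return (up or down) and (left or right)
-- ===== Notes on version B (the rewrite author's own statement) =====
-- stated objective: simpler
-- what changed: Replaced building the filtered 'roads' list and its length/coordinate-comparison case analysis with four unconditional neighbor booleans combined by the closed-form (up or down) and (left or right).
import Mathlib
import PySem

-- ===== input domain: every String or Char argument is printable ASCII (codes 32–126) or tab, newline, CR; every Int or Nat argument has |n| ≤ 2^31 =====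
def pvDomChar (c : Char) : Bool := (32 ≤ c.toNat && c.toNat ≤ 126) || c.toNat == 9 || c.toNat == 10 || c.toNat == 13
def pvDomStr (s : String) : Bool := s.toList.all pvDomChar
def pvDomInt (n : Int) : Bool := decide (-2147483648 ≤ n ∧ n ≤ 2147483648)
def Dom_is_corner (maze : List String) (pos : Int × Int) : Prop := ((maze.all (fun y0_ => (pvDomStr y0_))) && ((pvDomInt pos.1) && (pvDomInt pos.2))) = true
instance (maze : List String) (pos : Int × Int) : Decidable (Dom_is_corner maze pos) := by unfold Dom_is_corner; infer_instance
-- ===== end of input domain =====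

-- B replaces A's filtered 'roads' list and length/coordinate case analysis with a
-- closed-form boolean over the four neighbor cells; objective: simpler.


-- maze[i][j] with Python index semantics; none = IndexError
def pvCell (maze : List String) (i j : Int) : Option Char :=
  (PySem.List.pyGet? maze i).bind (fun row => PySem.Str.pyGet? row j)

-- ===== PORT A =====
def is_corner (maze : List String) (pos : Int × Int) : Bool :=
  let x := pos.1
  let y := pos.2
  match pvCell maze x y with
  | none => false        -- IndexError: outside Pre_
  | some c =>
    if c = '#' then false
    else
      let roads := [(x-1, y), (x, y+1), (x+1, y), (x, y-1)].filter
        (fun n => pvCell maze n.1 n.2 = some '.')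
      if roads.length > 2 then true
      else match roads with
        | [a, b] => decide (a.1 ≠ b.1) && decide (a.2 ≠ b.2)
        | _ => false

-- ===== PORT B =====
def is_corner_alt (maze : List String) (pos : Int × Int) : Bool :=
  let x := pos.1
  let y := pos.2
  match pvCell maze x y with
  | none => false        -- IndexError: outside Pre_
  | some c =>
    if c = '#' then false
    else
      let up := pvCell maze (x-1) y = some '.'
      let right := pvCell maze x (y+1) = some '.'
      let down := pvCell maze (x+1) y = some '.'
      let left := pvCell maze x (y-1) = some '.'
      (up || down) && (left || right)

-- ===== PRECONDITION & SPEC =====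
-- Pre_: the (x,y) lookup succeeds, and unless that cell is '#', the four neighbor lookups succeed too (otherwise Python A raises IndexError).
def Pre_is_corner (maze : List String) (pos : Int × Int) : Prop :=
  (pvCell maze pos.1 pos.2).isSome ∧
  (pvCell maze pos.1 pos.2 ≠ some '#' →
    (pvCell maze (pos.1-1) pos.2).isSome ∧ (pvCell maze pos.1 (pos.2+1)).isSome ∧
    (pvCell maze (pos.1+1) pos.2).isSome ∧ (pvCell maze pos.1 (pos.2-1)).isSome)
instance (maze : List String) (pos : Int × Int) : Decidable (Pre_is_corner maze pos) := by unfold Pre_is_corner; infer_instance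
def pvWitness_is_corner : List String × (Int × Int) := (["...", "...", "..."], (1, 1))
def Spec_is_corner (maze : List String) (pos : Int × Int) (out : Bool) : Prop := out = is_corner_alt maze pos
instance (maze : List String) (pos : Int × Int) (out : Bool) : Decidable (Spec_is_corner maze pos out) := by unfold Spec_is_corner; infer_instance

-- ===== CLAIM (what is proved, stated in full; the proofs are below) =====
def Claim_equal_is_corner : Prop := ∀ (maze : List String) (pos : Int × Int), Dom_is_corner maze pos → Pre_is_corner maze pos → Spec_is_corner maze pos (is_corner maze pos)

-- ===== LEMMAS AND PROOFS =====

-- ===== VERDICT (by name: the statement is the Claim_ definition above) =====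
theorem is_corner_spec : Claim_equal_is_corner := by
  intro maze pos _ _
  unfold Spec_is_corner is_corner is_corner_alt
  rcases pos with ⟨x, y⟩
  simp only
  cases pvCell maze x y with
  | none => rfl
  | some c =>
    by_cases hc : c = '#'
    · simp [hc]
    · by_cases h1 : pvCell maze (x-1) y = some '.' <;>
      by_cases h2 : pvCell maze x (y+1) = some '.' <;>
      by_cases h3 : pvCell maze (x+1) y = some '.' <;>
      by_cases h4 : pvCell maze x (y-1) = some '.' <;>
        simp [hc, h1, h2, h3, h4, List.filter] <;> omega
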